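-- pv_equiv track=rewrite | github.com/temeddix/interview-practice | baekjoon/21611.py | blow_up_marbles
-- ===== SOURCE A (Python) =====
-- EMPTY = 0
--
-- def pull_marbles(marbles: list[int]):
--     buffer = [m for m in marbles if m != EMPTY]
--     for i, m in enumerate(buffer):
--         marbles[i] = m
--     for i in range(len(buffer), len(marbles)):
--         marbles[i] = EMPTY
--
-- EXPLOSION_GROUP = 4
--
-- def blow_up_marbles(marbles: list[int]) -> int:
--     bead_size = len(marbles)
--
--     explosion_score = 0
--     pointer = 0
--     while pointer < bead_size:
--         base_pointer = pointer
--         base_marble = marbles[pointer]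
--         if base_marble == EMPTY:
--             break
--         while pointer < bead_size and marbles[pointer] == base_marble:
--             pointer += 1
--         group_size = pointer - base_pointer
--         if group_size >= EXPLOSION_GROUP:
--             explosion_score += base_marble * group_size
--             for i in range(base_pointer, pointer):
--                 marbles[i] = EMPTY
--
--     if explosion_score > 0:
--         pull_marbles(marbles)
--
--     return explosion_score
-- ===== SOURCE B (Python) =====
-- EMPTY = 0
-- EXPLOSION_GROUP = 4
--
-- def blow_up_marbles(marbles: list[int]) -> int:
--     # Run-length-encode the prefix before the first EMPTY, score runs >= 4 at once.
--     prefix = []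
--     for m in marbles:
--         if m == EMPTY:
--             break
--         prefix.append(m)
--
--     runs = []
--     for m in prefix:
--         if runs and runs[-1][0] == m:
--             runs[-1][1] += 1
--         else:
--             runs.append([m, 1])
--
--     score = sum(v * c for v, c in runs if c >= EXPLOSION_GROUP)
--
--     # Same in-place effect as A: exploded runs blanked, then pulled if score > 0.
--     new_prefix = []
--     for v, c in runs:
--         new_prefix.extend([EMPTY] * c if c >= EXPLOSION_GROUP else [v] * c)
--     marbles[:len(new_prefix)] = new_prefix
--     if score > 0:
--         live = [m for m in marbles if m != EMPTY]
--         marbles[:] = live + [EMPTY] * (len(marbles) - len(live))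
--
--     return score
-- ===== Notes on version B (the rewrite author's own statement) =====
-- stated objective: alternative
-- what changed: Replaces A's two nested index-pointer scans with blanking in place by a break-at-zero prefix collection, a run-length encoding pass, and a single sum over the (value,count) runs with count>=4 (mutation rebuilt from the runs).
import Mathlib
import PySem

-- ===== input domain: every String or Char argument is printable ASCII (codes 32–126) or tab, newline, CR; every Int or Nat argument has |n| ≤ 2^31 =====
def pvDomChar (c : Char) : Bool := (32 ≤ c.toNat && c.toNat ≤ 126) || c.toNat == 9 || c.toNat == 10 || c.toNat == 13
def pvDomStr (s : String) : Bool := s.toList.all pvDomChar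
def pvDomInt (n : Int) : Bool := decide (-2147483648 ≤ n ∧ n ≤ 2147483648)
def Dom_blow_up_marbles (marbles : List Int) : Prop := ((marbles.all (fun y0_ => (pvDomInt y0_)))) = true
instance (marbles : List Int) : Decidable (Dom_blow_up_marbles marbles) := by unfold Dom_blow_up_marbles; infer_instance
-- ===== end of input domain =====

-- B re-implements A via run-length encoding of the prefix before the first 0 instead of
-- nested pointer scans; same return value. Both Pythons mutate `marbles` identically; the
-- equivalence proved here is about the RETURN value only (the Python mutation never
-- affects any value A reads, so the ports omit it).

-- ===== PORT A =====
-- helper: needed by the ports for termination of the while loops.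
theorem pvAdv_ge_aux {n p : Nat} (h : p < n) : n - (p + 1) < n - p := by omega

-- inner while: `while pointer < bead_size and marbles[pointer] == base_marble: pointer += 1`
-- (pointer is always a valid index here, so `marbles[pointer]` is `getD pointer 0` exactly)
def pvInnerA (marbles : List Int) (n : Nat) (base : Int) (p : Nat) : Nat :=
  if h : p < n then
    if marbles.getD p 0 = base then pvInnerA marbles n base (p + 1) else p
  else p
termination_by n - p
decreasing_by exact pvAdv_ge_aux h

-- termination facts for the outer loop (cited by the port's decreasing_by)
theorem pvInnerA_ge (marbles : List Int) (n : Nat) (base : Int) (p : Nat) :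
    p ≤ pvInnerA marbles n base p := by
  rw [pvInnerA]
  split
  · split
    · exact Nat.le_trans (Nat.le_succ p) (pvInnerA_ge marbles n base (p + 1))
    · exact Nat.le_refl p
  · exact Nat.le_refl p
termination_by n - p

theorem pvInnerA_gt (marbles : List Int) (n : Nat) (p : Nat) (h : p < n) :
    p < pvInnerA marbles n (marbles.getD p 0) p := by
  rw [pvInnerA]
  simp only [dif_pos h]
  exact Nat.lt_of_lt_of_le (Nat.lt_succ_self p) (pvInnerA_ge marbles n _ (p + 1))

-- outer while over `pointer`, accumulating explosion_score; the in-place blanking of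
-- exploded positions is dead for the return value (only indices ≥ pointer are read later).
def pvOuterA (marbles : List Int) (n : Nat) (p : Nat) (score : Int) : Int :=
  if h : p < n then
    let base := marbles.getD p 0
    if base = 0 then score
    else
      let q := pvInnerA marbles n base p
      let g : Nat := q - p
      if 4 ≤ g then pvOuterA marbles n q (score + base * (g : Int))
      else pvOuterA marbles n q score
  else score
termination_by n - p
decreasing_by
  all_goals have := pvInnerA_gt marbles n p h; omega

def blow_up_marbles (marbles : List Int) : Int :=
  pvOuterA marbles marbles.length 0 0

-- ===== PORT B =====
-- prefix collection: `for m in marbles: if m == EMPTY: break; prefix.append(m)`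
def pvPrefB : List Int → List Int
  | [] => []
  | m :: rest => if m = 0 then [] else m :: pvPrefB rest

-- run-length step: check runs[-1] and increment, or append [m,1]; runs kept reversed
-- (last run at the head), reversed back below.
def pvRleStep (runs : List (Int × Int)) (m : Int) : List (Int × Int) :=
  match runs with
  | (v, c) :: rest => if v = m then (v, c + 1) :: rest else (m, 1) :: (v, c) :: rest
  | [] => [(m, 1)]

-- `sum(v * c for v, c in runs if c >= 4)`
def pvScoreB (runs : List (Int × Int)) : Int :=
  (runs.filter (fun vc => 4 ≤ vc.2)).foldl (fun s vc => s + vc.1 * vc.2) 0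

def blow_up_marbles_alt (marbles : List Int) : Int :=
  pvScoreB ((pvPrefB marbles).foldl pvRleStep []).reverse

-- ===== PRECONDITION & SPEC =====
def Spec_blow_up_marbles (marbles : List Int) (out : Int) : Prop := out = blow_up_marbles_alt marbles
instance (marbles : List Int) (out : Int) : Decidable (Spec_blow_up_marbles marbles out) := by unfold Spec_blow_up_marbles; infer_instance

-- ===== CLAIM (what is proved, stated in full; the proofs are below) =====
def Claim_equal_blow_up_marbles : Prop := ∀ (marbles : List Int), Dom_blow_up_marbles marbles → Spec_blow_up_marbles marbles (blow_up_marbles marbles)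

-- ===== LEMMAS AND PROOFS =====

-- `drop` past the matched prefix is `dropWhile`
theorem pvDropTakeWhile (q : Int → Bool) : ∀ l : List Int, l.drop (l.takeWhile q).length = l.dropWhile q
  | [] => rfl
  | x :: xs => by
    by_cases h : q x
    · simp [h, pvDropTakeWhile q xs]
    · simp [h]

-- common right-hand side: score of the run-peeled prefix (reference function)
def pvS : List Int → Int
  | [] => 0
  | x :: xs =>
    if x = 0 then 0
    else
      let k : Nat := (xs.takeWhile (fun y => y = x)).length + 1
      (if 4 ≤ k then x * (k : Int) else 0) + pvS (xs.dropWhile (fun y => y = x))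
termination_by l => l.length
decreasing_by
  have := List.length_dropWhile_le (fun y => decide (y = x)) xs; simp at *; omega

-- ---- A side ----

theorem pvInnerA_eq (marbles : List Int) (base : Int) (p : Nat) :
    pvInnerA marbles marbles.length base p
      = p + ((marbles.drop p).takeWhile (fun y => y = base)).length := by
  rw [pvInnerA]
  by_cases h : p < marbles.length
  · rw [List.drop_eq_getElem_cons h]
    have hg : marbles.getD p 0 = marbles[p] := List.getD_eq_getElem marbles 0 h
    by_cases hb : marbles[p] = base
    · simp only [dif_pos h, hg, hb, if_pos rfl, List.takeWhile_cons, decide_true,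
        if_true]
      rw [pvInnerA_eq marbles base (p + 1)]
      simp; omega
    · simp only [dif_pos h, hg, if_neg hb, List.takeWhile_cons]
      simp [hb]
  · have : marbles.drop p = [] := List.drop_eq_nil_of_le (by omega)
    simp [dif_neg h, this]
termination_by marbles.length - p

theorem pvOuterA_eq (marbles : List Int) (p : Nat) (s : Int) :
    pvOuterA marbles marbles.length p s = s + pvS (marbles.drop p) := by
  rw [pvOuterA]
  by_cases h : p < marbles.length
  · have hdrop := List.drop_eq_getElem_cons h
    have hg : marbles.getD p 0 = marbles[p] := List.getD_eq_getElem marbles 0 h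
    rw [dif_pos h]
    by_cases hz : marbles[p] = 0
    · rw [hg, if_pos hz, hdrop, pvS, if_pos hz]
      simp
    · rw [hg, if_neg hz]
      dsimp only
      set t := ((marbles.drop (p+1)).takeWhile (fun y => y = marbles[p])).length with ht
      have hq : pvInnerA marbles marbles.length marbles[p] p = p + 1 + t := by
        rw [pvInnerA_eq marbles marbles[p] p, hdrop]
        rw [List.takeWhile_cons]
        simp [← ht]
        omega
      have hdq : marbles.drop (p + 1 + t) = (marbles.drop (p+1)).dropWhile (fun y => y = marbles[p]) := by
        have := pvDropTakeWhile (fun y => decide (y = marbles[p])) (marbles.drop (p+1))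
        rw [← this, ← ht, List.drop_drop]
      have hSx : pvS (marbles.drop p) =
          (if 4 ≤ t + 1 then marbles[p] * ((t + 1 : Nat) : Int) else 0)
            + pvS ((marbles.drop (p+1)).dropWhile (fun y => y = marbles[p])) := by
        rw [hdrop, pvS, if_neg hz]
      rw [hq]
      have hgp : p + 1 + t - p = t + 1 := by omega
      rw [hgp]
      by_cases hgrp : 4 ≤ t + 1
      · rw [if_pos hgrp, pvOuterA_eq marbles (p + 1 + t), hdq, hSx, if_pos hgrp]
        ring
      · rw [if_neg hgrp, pvOuterA_eq marbles (p + 1 + t), hdq, hSx, if_neg hgrp]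
        ring
  · have hd : marbles.drop p = [] := List.drop_eq_nil_of_le (by omega)
    rw [dif_neg h, hd]
    simp [pvS]
termination_by marbles.length - p
decreasing_by all_goals (have := pvInnerA_gt marbles marbles.length p h; rw [hg] at this; omega)

def pvRle : List Int → List (Int × Int)
  | [] => []
  | x :: xs =>
    (x, 1 + ((xs.takeWhile (fun y => y = x)).length : Int)) :: pvRle (xs.dropWhile (fun y => y = x))
termination_by l => l.length
decreasing_by
  have := List.length_dropWhile_le (fun y => decide (y = x)) xs; simp at *; omega

theorem pvFoldlRle_eq (ys : List Int) : ∀ (v c : Int) (acc : List (Int × Int)),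
    List.foldl pvRleStep ((v, c) :: acc) ys
      = ((v, c + ((ys.takeWhile (fun y => y = v)).length : Int))
          :: pvRle (ys.dropWhile (fun y => y = v))).reverse ++ acc := by
  induction ys with
  | nil => intro v c acc; simp [pvRle]
  | cons y t ih =>
    intro v c acc
    by_cases hv : v = y
    · subst hv
      simp only [List.foldl_cons, pvRleStep, if_pos rfl, List.takeWhile_cons, decide_true,
        if_true, List.dropWhile_cons, ih]
      simp
      ring_nf
    · have hy : ¬ (y = v) := fun h2 => hv h2.symm
      simp only [List.foldl_cons, pvRleStep, if_neg hv, ih, List.takeWhile_cons,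
        List.dropWhile_cons, hy, decide_false]
      simp [pvRle, List.takeWhile_cons, hy]

theorem pvFoldlRle_nil_eq : ∀ l : List Int, (List.foldl pvRleStep [] l).reverse = pvRle l
  | [] => by simp [pvRle]
  | x :: xs => by
    have h2 := pvFoldlRle_eq xs x 1 []
    simp only [List.foldl_cons, pvRleStep] at *
    rw [h2]
    simp [pvRle]

theorem pvScoreB_foldl (l : List (Int × Int)) : ∀ a : Int,
    (l.filter (fun vc => 4 ≤ vc.2)).foldl (fun s vc => s + vc.1 * vc.2) a
      = a + ((l.map (fun vc => if 4 ≤ vc.2 then vc.1 * vc.2 else 0)).sum) := by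
  induction l with
  | nil => intro a; simp
  | cons x t ih =>
    intro a
    by_cases hx : 4 ≤ x.2
    · simp only [List.filter_cons, hx, decide_true, if_true, List.foldl_cons, List.map_cons,
        List.sum_cons, ih]
      ring
    · simp only [List.filter_cons, hx, decide_false, List.map_cons, List.sum_cons]
      simp [hx]
      exact ih a

theorem pvScoreB_cons (x : Int × Int) (r : List (Int × Int)) :
    pvScoreB (x :: r) = (if 4 ≤ x.2 then x.1 * x.2 else 0) + pvScoreB r := by
  unfold pvScoreB
  rw [pvScoreB_foldl, pvScoreB_foldl]
  simp

theorem pvPrefB_takeWhile (x : Int) (hx : x ≠ 0) : ∀ xs : List Int,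
    (pvPrefB xs).takeWhile (fun y => y = x) = xs.takeWhile (fun y => y = x)
  | [] => rfl
  | y :: t => by
    by_cases hy : y = 0
    · subst hy
      simp [pvPrefB, List.takeWhile_cons, Ne.symm hx]
    · by_cases hxy : y = x
      · simp [pvPrefB, hy, hx, List.takeWhile_cons, hxy, pvPrefB_takeWhile x hx t]
      · simp [pvPrefB, hy, List.takeWhile_cons, hxy]

theorem pvPrefB_dropWhile (x : Int) (hx : x ≠ 0) : ∀ xs : List Int,
    (pvPrefB xs).dropWhile (fun y => y = x) = pvPrefB (xs.dropWhile (fun y => y = x))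
  | [] => rfl
  | y :: t => by
    by_cases hy : y = 0
    · subst hy
      simp [pvPrefB, List.dropWhile_cons, Ne.symm hx]
    · by_cases hxy : y = x
      · simp [pvPrefB, hy, hx, List.dropWhile_cons, hxy, pvPrefB_dropWhile x hx t]
      · simp [pvPrefB, hy, List.dropWhile_cons, hxy]

theorem pvScoreRle_prefB (l : List Int) : pvScoreB (pvRle (pvPrefB l)) = pvS l := by
  match l with
  | [] => simp [pvPrefB, pvRle, pvScoreB, pvS]
  | x :: xs =>
    by_cases hx : x = 0
    · subst hx; simp [pvPrefB, pvRle, pvScoreB, pvS]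
    · have hpre : pvPrefB (x :: xs) = x :: pvPrefB xs := by simp [pvPrefB, hx]
      rw [hpre, pvRle, pvScoreB_cons, pvPrefB_takeWhile x hx xs, pvPrefB_dropWhile x hx xs,
        pvScoreRle_prefB (xs.dropWhile (fun y => y = x))]
      rw [pvS, if_neg hx]
      dsimp only
      set n := (xs.takeWhile (fun y => y = x)).length with hn
      by_cases hc : 4 ≤ n + 1
      · rw [if_pos hc, if_pos (show (4:Int) ≤ 1 + (n:Int) by omega)]
        push_cast; ring
      · rw [if_neg hc, if_neg (show ¬ (4:Int) ≤ 1 + (n:Int) by omega)]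
termination_by l.length
decreasing_by
  have := List.length_dropWhile_le (fun y => decide (y = x)) xs; simp at *; omega

-- ===== VERDICT (by name: the statement is the Claim_ definition above) =====
theorem blow_up_marbles_spec : Claim_equal_blow_up_marbles := by
  intro marbles _
  unfold Spec_blow_up_marbles blow_up_marbles blow_up_marbles_alt
  rw [pvOuterA_eq marbles 0 0, List.drop_zero, pvFoldlRle_nil_eq, pvScoreRle_prefB]
  omega
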